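-- pv_equiv track=rewrite | github.com/shreyashah/cafy-base-pytest | cafy_pytest/plugin.py | get_final_status
-- ===== SOURCE A (Python) =====
-- def get_final_status(mode_list):
--     final_mode=""
--     if(len(mode_list)>0):
--         if 'cli' in mode_list:
--             return 'cli'
--         else:
--             final_mode=mode_list[0]
--             for mode in mode_list:
--                 final_mode=final_mode and mode
--             return final_mode
--     return final_mode
-- ===== SOURCE B (Python) =====
-- def get_final_status(mode_list):
--     # For string modes the only falsy value is '', so the and-fold collapses to:
--     # '' if any empty string occurs, otherwise the last mode.
--     if not mode_list:
--         return ""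
--     if 'cli' in mode_list:
--         return 'cli'
--     if '' in mode_list:
--         return ''
--     return mode_list[-1]
-- ===== Notes on version B (the rewrite author's own statement) =====
-- stated objective: simpler
-- what changed: Removes A's and-fold accumulator entirely: since string modes are falsy exactly when empty, B is loop-free and decides the result by two membership tests ('cli' in list, '' in list) and the last element.
import Mathlib
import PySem

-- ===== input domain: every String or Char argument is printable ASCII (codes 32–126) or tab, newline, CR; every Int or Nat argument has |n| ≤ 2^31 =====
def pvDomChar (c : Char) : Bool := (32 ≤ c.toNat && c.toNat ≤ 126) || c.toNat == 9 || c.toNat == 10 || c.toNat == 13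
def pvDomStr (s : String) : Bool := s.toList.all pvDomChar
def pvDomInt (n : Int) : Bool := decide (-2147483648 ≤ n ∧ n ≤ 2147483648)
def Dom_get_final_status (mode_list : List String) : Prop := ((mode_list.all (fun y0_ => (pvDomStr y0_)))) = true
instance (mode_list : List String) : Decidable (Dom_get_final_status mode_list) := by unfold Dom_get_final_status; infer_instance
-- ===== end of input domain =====

-- B is loop-free: it replaces A's and-fold accumulator by membership tests ('' is the only falsy string) — simpler.
-- ===== PORT A =====
def get_final_status (mode_list : List String) : String :=
  let final_mode := ""
  if mode_list.length > 0 then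
    if "cli" ∈ mode_list then "cli"
    else
      -- mode_list[0]; length > 0 so no IndexError
      let final_mode := mode_list.headD ""
      -- `final_mode and mode` on strings: if final_mode is falsy ("") keep it, else take mode
      mode_list.foldl (fun acc mode => if acc = "" then acc else mode) final_mode
  else final_mode

-- ===== PORT B =====
def get_final_status_alt (mode_list : List String) : String :=
  if mode_list = [] then ""
  else if "cli" ∈ mode_list then "cli"
  else if "" ∈ mode_list then ""
  else mode_list.getLastD ""   -- mode_list[-1]; list nonempty

-- ===== PRECONDITION & SPEC =====
def Spec_get_final_status (mode_list : List String) (out : String) : Prop := out = get_final_status_alt mode_list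
instance (mode_list : List String) (out : String) : Decidable (Spec_get_final_status mode_list out) := by unfold Spec_get_final_status; infer_instance

-- ===== CLAIM (what is proved, stated in full; the proofs are below) =====
def Claim_equal_get_final_status : Prop := ∀ (mode_list : List String), Dom_get_final_status mode_list → Spec_get_final_status mode_list (get_final_status mode_list)

-- ===== LEMMAS AND PROOFS =====

theorem pvFoldl_empty (l : List String) :
    l.foldl (fun acc mode => if acc = "" then acc else mode) "" = "" := by
  induction l with
  | nil => rfl
  | cons m t ih => simpa using ih

theorem pvGetLastD_cons (m a : String) (t : List String) :
    t.getLast?.getD m = (m :: t).getLast?.getD a := by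
  cases t with
  | nil => rfl
  | cons b s =>
    simp [List.getLast?_cons_cons,
      List.getLast?_eq_some_getLast (l := b :: s) (by simp)]

theorem pvFoldl_eq_mem (l : List String) (a : String) (ha : a ≠ "") :
    l.foldl (fun acc mode => if acc = "" then acc else mode) a
      = (if "" ∈ l then "" else l.getLastD a) := by
  induction l generalizing a with
  | nil => rfl
  | cons m t ih =>
    simp only [List.foldl_cons, if_neg ha, List.mem_cons]
    by_cases hm : m = ""
    · simp [hm, pvFoldl_empty]
    · rw [ih m hm]
      by_cases hmem : "" ∈ t
      · simp [hmem, Ne.symm hm]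
      · have hcond : ¬("" = m ∨ "" ∈ t) := by simp [Ne.symm hm, hmem]
        rw [if_neg hcond, List.getLastD_eq_getLast?, List.getLastD_eq_getLast?, if_neg hmem]
        exact pvGetLastD_cons m a t

-- ===== VERDICT (by name: the statement is the Claim_ definition above) =====
theorem get_final_status_spec : Claim_equal_get_final_status := by
  intro mode_list _
  unfold Spec_get_final_status get_final_status get_final_status_alt
  cases mode_list with
  | nil => rfl
  | cons h t =>
    simp only [List.length_cons]
    by_cases hc : "cli" ∈ h :: t
    · simp [hc]
    · simp only [hc, if_pos (Nat.succ_pos _), ite_false, List.headD_cons,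
        List.foldl_cons, List.mem_cons, reduceCtorEq]
      have fh : (if h = "" then h else h) = h := by split <;> simp_all
      rw [fh]
      by_cases hh : h = ""
      · subst hh
        simp [pvFoldl_empty]
      · rw [pvFoldl_eq_mem t h hh]
        by_cases hmem : "" ∈ t
        · simp [hmem, Ne.symm hh]
        · rw [if_neg hmem, if_neg (by simpa [Ne.symm hh] using hmem),
            List.getLastD_eq_getLast?, List.getLastD_eq_getLast?]
          exact pvGetLastD_cons h "" t
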